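-- pv_equiv track=rewrite | github.com/N4rut0o/Distancia-Maxima-Sapos | comparacao_desempenho.py | solucao_rapida
-- ===== SOURCE A (Python) =====
-- def solucao_rapida(blocos):
--     if len(blocos) == 0:
--         return 0, 0
--     n = len(blocos)
--     esquerda = [0] * n
--     for i in range(1, n):
--         esquerda[i] = esquerda[i - 1] if blocos[i - 1] >= blocos[i] else i
--     direita = [0] * n
--     direita[n - 1] = n - 1
--     for i in range(n - 2, -1, -1):
--         direita[i] = direita[i + 1] if blocos[i + 1] >= blocos[i] else i
--     maior_distancia = 0
--     partida = 0
--     for i in range(n):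
--         distancia = direita[i] - esquerda[i]
--         if distancia > maior_distancia:
--             maior_distancia = distancia
--             partida = i
--     return maior_distancia, partida
-- ===== SOURCE B (Python) =====
-- def solucao_rapida(blocos):
--     n = len(blocos)
--     if n == 0:
--         return 0, 0
--     maior_distancia = 0
--     partida = 0
--     for i in range(n):
--         j = i
--         while j > 0 and blocos[j - 1] >= blocos[j]:
--             j -= 1
--         k = i
--         while k < n - 1 and blocos[k + 1] >= blocos[k]:
--             k += 1
--         distancia = k - j
--         if distancia > maior_distancia:
--             maior_distancia = distancia
--             partida = i
--     return maior_distancia, partida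
-- ===== Notes on version B (the rewrite author's own statement) =====
-- stated objective: simpler
-- what changed: Replaced the two precomputed DP tables (esquerda/direita) by on-the-fly expansion from each index with two while loops; no auxiliary arrays are kept.
import Mathlib
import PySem

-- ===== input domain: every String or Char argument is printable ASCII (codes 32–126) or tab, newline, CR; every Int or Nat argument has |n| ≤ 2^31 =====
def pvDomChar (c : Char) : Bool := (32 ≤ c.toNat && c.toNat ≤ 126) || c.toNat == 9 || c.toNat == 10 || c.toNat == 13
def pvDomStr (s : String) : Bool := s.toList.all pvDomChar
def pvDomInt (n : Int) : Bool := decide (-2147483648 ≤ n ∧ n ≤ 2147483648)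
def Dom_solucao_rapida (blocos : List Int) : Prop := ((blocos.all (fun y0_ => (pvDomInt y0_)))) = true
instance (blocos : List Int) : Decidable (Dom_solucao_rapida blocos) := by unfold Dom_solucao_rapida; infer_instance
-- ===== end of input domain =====

-- B replaces A's two precomputed DP tables by on-the-fly while-loop expansion from each
-- index (objective: simpler — no auxiliary arrays); return value proved equal on all inputs.

-- ===== PORT A =====
def solucao_rapida (blocos : List Int) : Int × Int :=
  if blocos.length = 0 then (0, 0)
  else
    let n := blocos.length
    let esquerda := (List.range' 1 (n - 1)).foldl
      (fun e i => e.set i (if blocos.getD (i - 1) 0 ≥ blocos.getD i 0 then e.getD (i - 1) 0 else (i : Int)))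
      (List.replicate n (0 : Int))
    let direita := ((List.range (n - 1)).reverse).foldl
      (fun d i => d.set i (if blocos.getD (i + 1) 0 ≥ blocos.getD i 0 then d.getD (i + 1) 0 else (i : Int)))
      ((List.replicate n (0 : Int)).set (n - 1) ((n - 1 : Nat) : Int))
    (List.range n).foldl
      (fun st i =>
        let distancia := direita.getD i 0 - esquerda.getD i 0
        if distancia > st.1 then (distancia, (i : Int)) else st)
      (0, 0)

-- ===== PORT B =====
-- while j > 0 and blocos[j-1] >= blocos[j]: j -= 1   (structural recursion on j)
def expandL (blocos : List Int) : Nat → Nat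
  | 0 => 0
  | j + 1 => if blocos.getD j 0 ≥ blocos.getD (j + 1) 0 then expandL blocos j else j + 1

-- while k < n - 1 and blocos[k+1] >= blocos[k]: k += 1   (recursion on the distance to n-1)
def expandR (blocos : List Int) (n : Nat) (k : Nat) : Nat :=
  if k + 1 < n then
    if blocos.getD (k + 1) 0 ≥ blocos.getD k 0 then expandR blocos n (k + 1) else k
  else k
termination_by n - k
decreasing_by omega

def solucao_rapida_alt (blocos : List Int) : Int × Int :=
  let n := blocos.length
  if n = 0 then (0, 0)
  else
    (List.range n).foldl
      (fun st i =>
        let j := expandL blocos i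
        let k := expandR blocos n i
        let distancia : Int := (k : Int) - (j : Int)
        if distancia > st.1 then (distancia, (i : Int)) else st)
      (0, 0)

-- ===== PRECONDITION & SPEC =====
def Spec_solucao_rapida (blocos : List Int) (out : Int × Int) : Prop := out = solucao_rapida_alt blocos
instance (blocos : List Int) (out : Int × Int) : Decidable (Spec_solucao_rapida blocos out) := by unfold Spec_solucao_rapida; infer_instance

-- ===== CLAIM (what is proved, stated in full; the proofs are below) =====
def Claim_equal_solucao_rapida : Prop := ∀ (blocos : List Int), Dom_solucao_rapida blocos → Spec_solucao_rapida blocos (solucao_rapida blocos)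

-- ===== LEMMAS AND PROOFS =====

theorem getD_set_self (s : List Int) (i : Nat) (v : Int) (h : i < s.length) :
    (s.set i v).getD i 0 = v := by
  simp [List.getD_eq_getElem?_getD, h]

theorem getD_set_ne (s : List Int) (i j : Nat) (v : Int) (h : j ≠ i) :
    (s.set i v).getD j 0 = s.getD j 0 := by
  simp [List.getD_eq_getElem?_getD, List.getElem?_set_ne (Ne.symm h)]

-- invariant for A's esquerda loop: after processing range' t m, entries < t+m hold expandL
theorem esq_inv (blocos : List Int) :
    ∀ (m t : Nat) (s : List Int), 1 ≤ t → t + m ≤ blocos.length → s.length = blocos.length →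
      (∀ i, i < t → s.getD i 0 = (expandL blocos i : Int)) →
      ∀ i, i < t + m →
        ((List.range' t m).foldl
          (fun e i => e.set i (if blocos.getD (i - 1) 0 ≥ blocos.getD i 0 then e.getD (i - 1) 0 else (i : Int)))
          s).getD i 0 = (expandL blocos i : Int) := by
  intro m
  induction m with
  | zero => intro t s _ _ _ hs i hi; simpa using hs i (by omega)
  | succ m ih =>
    intro t s ht hb hlen hs i hi
    rw [List.range'_succ, List.foldl_cons]
    have htlt : t < s.length := by omega
    have hstep : ∀ j, j < t + 1 →
        (s.set t (if blocos.getD (t - 1) 0 ≥ blocos.getD t 0 then s.getD (t - 1) 0 else (t : Int))).getD j 0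
          = (expandL blocos j : Int) := by
      intro j hj
      rcases Nat.lt_or_ge j t with hjt | hjt
      · rw [getD_set_ne _ _ _ _ (by omega)]; exact hs j hjt
      · have hjt' : j = t := by omega
        subst hjt'
        rw [getD_set_self _ _ _ htlt]
        obtain ⟨t', rfl⟩ : ∃ t', j = t' + 1 := ⟨j - 1, by omega⟩
        rw [show t' + 1 - 1 = t' from rfl]
        rw [expandL]
        split
        · exact hs t' (by omega)
        · rfl
    have := ih (t + 1)
      (s.set t (if blocos.getD (t - 1) 0 ≥ blocos.getD t 0 then s.getD (t - 1) 0 else (t : Int)))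
      (by omega) (by omega) (by simpa using hlen) hstep i (by omega)
    exact this

-- invariant for A's direita loop: processing (range m).reverse fills entries below m,
-- given entries ≥ m already hold expandR
theorem dir_inv (blocos : List Int) (n : Nat) (hn : n = blocos.length) :
    ∀ (m : Nat) (s : List Int), m + 1 ≤ n → s.length = n →
      (∀ i, m ≤ i → i < n → s.getD i 0 = (expandR blocos n i : Int)) →
      ∀ i, i < n →
        (((List.range m).reverse).foldl
          (fun d i => d.set i (if blocos.getD (i + 1) 0 ≥ blocos.getD i 0 then d.getD (i + 1) 0 else (i : Int)))
          s).getD i 0 = (expandR blocos n i : Int) := by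
  intro m
  induction m with
  | zero => intro s _ _ hs i hi; simpa using hs i (by omega) hi
  | succ m ih =>
    intro s hm hlen hs i hi
    rw [List.range_succ, List.reverse_append, List.reverse_singleton, List.singleton_append,
      List.foldl_cons]
    have hmlt : m < s.length := by omega
    have hstep : ∀ j, m ≤ j → j < n →
        (s.set m (if blocos.getD (m + 1) 0 ≥ blocos.getD m 0 then s.getD (m + 1) 0 else (m : Int))).getD j 0
          = (expandR blocos n j : Int) := by
      intro j hj hjn
      rcases Nat.lt_or_ge m j with hjm | hjm
      · rw [getD_set_ne _ _ _ _ (by omega)]; exact hs j (by omega) hjn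
      · have hjm' : j = m := by omega
        subst hjm'
        rw [getD_set_self _ _ _ hmlt]
        rw [expandR]
        have hcond : j + 1 < n := by omega
        rw [if_pos hcond]
        split
        · exact hs (j + 1) (by omega) hcond
        · rfl
    exact ih (s.set m (if blocos.getD (m + 1) 0 ≥ blocos.getD m 0 then s.getD (m + 1) 0 else (m : Int)))
      (by omega) (by simpa using hlen) hstep i hi

-- ===== VERDICT (by name: the statement is the Claim_ definition above) =====
theorem solucao_rapida_spec : Claim_equal_solucao_rapida := by
  intro blocos _
  show solucao_rapida blocos = solucao_rapida_alt blocos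
  by_cases h0 : blocos.length = 0
  · simp [solucao_rapida, solucao_rapida_alt, h0]
  · have hn : 1 ≤ blocos.length := Nat.pos_of_ne_zero h0
    simp only [solucao_rapida, solucao_rapida_alt, if_neg h0]
    apply PySem.List.foldl_congr_mem
    intro acc i hi
    rw [List.mem_range] at hi
    have hesq := esq_inv blocos (blocos.length - 1) 1 (List.replicate blocos.length 0)
      (le_refl 1) (by omega) (by simp)
      (fun j hj => by
        have : j = 0 := by omega
        subst this
        simp [List.getD_eq_getElem?_getD, expandL])
      i (by omega)
    have hdir := dir_inv blocos blocos.length rfl (blocos.length - 1)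
      ((List.replicate blocos.length (0 : Int)).set (blocos.length - 1) ((blocos.length - 1 : Nat) : Int))
      (by omega) (by simp)
      (fun j hj hjn => by
        have hj' : j = blocos.length - 1 := by omega
        subst hj'
        rw [getD_set_self _ _ _ (by simp; omega)]
        rw [expandR, if_neg (by omega)])
      i hi
    simp only [hesq, hdir]
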